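-- pv_equiv track=rewrite | github.com/Timo-Dokter/SW5e-2-ObsidianMD | species.py | get_infobox
-- ===== SOURCE A (Python) =====
-- def get_infobox(metadata):
--     infobox = """
-- > [!infobox]
-- > # `=this.file.name`
-- > ###### Visual Characteristics
-- >  |
-- > --- | --- |
-- """
--
--     for key, value in metadata.items():
--         if value.get("category") == "Visual Characteristics":
--             infobox += f"> **{value['label']}** | `=this.{key}` |\n"
--
--     infobox += """> ##### Physical Characteristics
-- >  |
-- > --- | --- | --- |
-- > **Height** | `=this.heightAverage` | `=this.heightRollMod` |
-- > **Weight** | `=this.weightAverage` | `=this.weightRollMod` |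
-- > ##### Sociocultural Characteristics
-- >  |
-- > --- | --- |\n"""
--
--     for key, value in metadata.items():
--         if value.get("category") == "Sociocultural Characteristics":
--             infobox += f"> **{value['label']}** | `=this.{key}` |\n"
--
--     return infobox
-- ===== SOURCE B (Python) =====
-- _HEAD = """
-- > [!infobox]
-- > # `=this.file.name`
-- > ###### Visual Characteristics
-- >  |
-- > --- | --- |
-- """
--
-- _MID = """> ##### Physical Characteristics
-- >  |
-- > --- | --- | --- |
-- > **Height** | `=this.heightAverage` | `=this.heightRollMod` |
-- > **Weight** | `=this.weightAverage` | `=this.weightRollMod` |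
-- > ##### Sociocultural Characteristics
-- >  |
-- > --- | --- |\n"""
--
--
-- def get_infobox(metadata):
--     # single grouping pass: collect each category's rendered rows, then join
--     visual, socio = [], []
--     for key, value in metadata.items():
--         category = value.get("category")
--         if category == "Visual Characteristics":
--             visual.append(f"> **{value['label']}** | `=this.{key}` |\n")
--         elif category == "Sociocultural Characteristics":
--             socio.append(f"> **{value['label']}** | `=this.{key}` |\n")
--     return _HEAD + "".join(visual) + _MID + "".join(socio)
-- ===== Notes on version B (the rewrite author's own statement) =====
-- stated objective: alternative
-- what changed: A makes two separate scans over metadata, each appending rows to one growing string; B makes a single grouping pass that collects the rendered rows of each category into two lists and then assembles the result as fixed fragments joined with the two buckets.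
import Mathlib
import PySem

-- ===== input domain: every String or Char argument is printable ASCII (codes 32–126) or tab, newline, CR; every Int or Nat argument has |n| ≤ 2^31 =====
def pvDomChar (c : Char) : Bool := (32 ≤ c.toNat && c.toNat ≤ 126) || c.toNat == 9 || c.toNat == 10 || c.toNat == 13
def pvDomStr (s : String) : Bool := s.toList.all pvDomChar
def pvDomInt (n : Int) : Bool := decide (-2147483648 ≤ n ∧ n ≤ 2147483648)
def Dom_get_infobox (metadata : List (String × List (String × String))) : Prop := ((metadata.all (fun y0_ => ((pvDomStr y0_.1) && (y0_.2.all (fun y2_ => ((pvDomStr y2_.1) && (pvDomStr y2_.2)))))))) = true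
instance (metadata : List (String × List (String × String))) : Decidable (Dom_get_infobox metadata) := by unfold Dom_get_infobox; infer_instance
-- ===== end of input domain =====

-- B replaces A's two scans over metadata by a single grouping pass that collects each
-- category's rendered rows into a list, then joins fixed fragments with the joined buckets
-- (objective: alternative decomposition, same cost).


-- the fixed text fragments of the infobox (shared literals of both Pythons)
def pvHead : String := "\n> [!infobox]\n> # `=this.file.name`\n> ###### Visual Characteristics\n>  |\n> --- | --- |\n"
def pvMid : String := "> ##### Physical Characteristics\n>  |\n> --- | --- | --- |\n> **Height** | `=this.heightAverage` | `=this.heightRollMod` |\n> **Weight** | `=this.weightAverage` | `=this.weightRollMod` |\n> ##### Sociocultural Characteristics\n>  |\n> --- | --- |\n"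

-- ===== PORT A =====
-- the f-string row f"> **{value['label']}** | `=this.{key}` |\n"; value['label'] raises KeyError
-- when "label" is absent — Pre_ excludes that, getD "" is the total stand-in there
def pvRow (key : String) (value : List (String × String)) : String :=
  "> **" ++ ((PySem.Dict.get? (PySem.Dict.mk value) "label").getD "") ++ "** | `=this." ++ key ++ "` |\n"

def get_infobox (metadata : List (String × List (String × String))) : String :=
  let infobox := pvHead
  let infobox := metadata.foldl (fun acc kv =>
    if PySem.Dict.get? (PySem.Dict.mk kv.2) "category" = some "Visual Characteristics" then
      acc ++ pvRow kv.1 kv.2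
    else acc) infobox
  let infobox := infobox ++ pvMid
  metadata.foldl (fun acc kv =>
    if PySem.Dict.get? (PySem.Dict.mk kv.2) "category" = some "Sociocultural Characteristics" then
      acc ++ pvRow kv.1 kv.2
    else acc) infobox

-- ===== PORT B =====
def get_infobox_alt (metadata : List (String × List (String × String))) : String :=
  let buckets := metadata.foldl (fun (b : List String × List String) kv =>
    let category := PySem.Dict.get? (PySem.Dict.mk kv.2) "category"
    if category = some "Visual Characteristics" then (b.1 ++ [pvRow kv.1 kv.2], b.2)
    else if category = some "Sociocultural Characteristics" then (b.1, b.2 ++ [pvRow kv.1 kv.2])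
    else b) ([], [])
  pvHead ++ PySem.Str.join "" buckets.1 ++ pvMid ++ PySem.Str.join "" buckets.2

-- ===== PRECONDITION & SPEC =====
-- Pre_ excludes (a) entries of a Visual/Sociocultural category without a "label" key, on which
-- A raises KeyError, and (b) association lists with duplicate outer or inner keys, whose Python
-- dict representation is ambiguous (dict construction collapses duplicates).
def Pre_get_infobox (metadata : List (String × List (String × String))) : Prop :=
  (metadata.map Prod.fst).Nodup ∧
  ∀ kv ∈ metadata, (kv.2.map Prod.fst).Nodup ∧
    ((PySem.Dict.get? (PySem.Dict.mk kv.2) "category" = some "Visual Characteristics" ∨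
      PySem.Dict.get? (PySem.Dict.mk kv.2) "category" = some "Sociocultural Characteristics") →
     "label" ∈ kv.2.map Prod.fst)
instance (metadata : List (String × List (String × String))) : Decidable (Pre_get_infobox metadata) := by unfold Pre_get_infobox; infer_instance

def pvWitness_get_infobox : (List (String × List (String × String))) :=
  [("eyeColor", [("category", "Visual Characteristics"), ("label", "Eye Color")]),
   ("homeworld", [("category", "Sociocultural Characteristics"), ("label", "Homeworld")]),
   ("size", [("label", "Size")])]

def Spec_get_infobox (metadata : List (String × List (String × String))) (out : String) : Prop := out = get_infobox_alt metadata
instance (metadata : List (String × List (String × String))) (out : String) : Decidable (Spec_get_infobox metadata out) := by unfold Spec_get_infobox; infer_instance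

-- ===== CLAIM (what is proved, stated in full; the proofs are below) =====
def Claim_equal_get_infobox : Prop := ∀ (metadata : List (String × List (String × String))), Dom_get_infobox metadata → Pre_get_infobox metadata → Spec_get_infobox metadata (get_infobox metadata)

-- ===== LEMMAS AND PROOFS =====

theorem pv_inter_nil (l : List (List Char)) : ([] : List Char).intercalate l = l.flatten := by
  induction l with
  | nil => simp [List.intercalate]
  | cons a t ih =>
    cases t with
    | nil => simp [List.intercalate]
    | cons b u =>
      simp only [List.intercalate, List.intersperse] at *
      simpa using ih

theorem pv_join_cons (x : String) (l : List String) :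
    PySem.Str.join "" (x :: l) = x ++ PySem.Str.join "" l := by
  apply String.toList_inj.mp
  simp [PySem.Str.join, PySem.Chars.join, pv_inter_nil]

theorem pv_join_nil : PySem.Str.join "" ([] : List String) = "" := by
  apply String.toList_inj.mp; simp [PySem.Str.join, PySem.Chars.join, List.intercalate]

-- the rows A's scan for category c emits, as a list
def pvRows (c : String) (metadata : List (String × List (String × String))) : List String :=
  metadata.filterMap (fun kv =>
    if PySem.Dict.get? (PySem.Dict.mk kv.2) "category" = some c then some (pvRow kv.1 kv.2) else none)

theorem pvA_scan (c : String) (metadata : List (String × List (String × String))) :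
    ∀ s : String,
      metadata.foldl (fun acc kv =>
        if PySem.Dict.get? (PySem.Dict.mk kv.2) "category" = some c then
          acc ++ pvRow kv.1 kv.2
        else acc) s = s ++ PySem.Str.join "" (pvRows c metadata) := by
  induction metadata with
  | nil => intro s; simp [pvRows, pv_join_nil]
  | cons kv t ih =>
    intro s
    by_cases h : PySem.Dict.get? (PySem.Dict.mk kv.2) "category" = some c <;>
      simp [pvRows, h, ih, pv_join_cons, String.append_assoc]

theorem pvB_scan (metadata : List (String × List (String × String))) :
    ∀ b : List String × List String,
      metadata.foldl (fun (b : List String × List String) kv =>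
        let category := PySem.Dict.get? (PySem.Dict.mk kv.2) "category"
        if category = some "Visual Characteristics" then (b.1 ++ [pvRow kv.1 kv.2], b.2)
        else if category = some "Sociocultural Characteristics" then (b.1, b.2 ++ [pvRow kv.1 kv.2])
        else b) b
      = (b.1 ++ pvRows "Visual Characteristics" metadata,
         b.2 ++ pvRows "Sociocultural Characteristics" metadata) := by
  induction metadata with
  | nil => intro b; simp [pvRows]
  | cons kv t ih =>
    intro b
    by_cases h₁ : PySem.Dict.get? (PySem.Dict.mk kv.2) "category" = some "Visual Characteristics"
    · simp [pvRows, h₁, ih]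
    · by_cases h₂ : PySem.Dict.get? (PySem.Dict.mk kv.2) "category" = some "Sociocultural Characteristics" <;>
        simp [pvRows, h₁, h₂, ih]

-- ===== VERDICT (by name: the statement is the Claim_ definition above) =====
theorem get_infobox_spec : Claim_equal_get_infobox := by
  intro metadata _ _
  unfold Spec_get_infobox get_infobox get_infobox_alt
  rw [pvA_scan, pvA_scan, pvB_scan]
  simp [String.append_assoc]
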